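-- pv_equiv track=rewrite | github.com/lagman79/opske_automation_agent | opske_automatation_agent.py | validate_afm
-- ===== SOURCE A (Python) =====
-- AFM_WEIGHTS = [256, 128, 64, 32, 16, 8, 4, 2]
--
-- def validate_afm(afm):
--     if not afm.isdigit() or len(afm) != 9:
--         return False
--     digits = [int(d) for d in afm]
--     total = sum(d * w for d, w in zip(digits[:8], AFM_WEIGHTS))
--     remainder = total % 11
--     check_digit = 0 if remainder == 10 else remainder
--     return digits[8] == check_digit
-- ===== SOURCE B (Python) =====
-- def validate_afm(afm):
--     # Horner doubling: sum(d_i * 2^(8-i)) == (fold of t*2+d over first 8 digits) * 2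
--     if not afm.isdigit() or len(afm) != 9:
--         return False
--     total = 0
--     for ch in afm[:8]:
--         total = total * 2 + int(ch)
--     total *= 2
--     remainder = total % 11
--     return int(afm[8]) == (0 if remainder == 10 else remainder)
-- ===== Notes on version B (the rewrite author's own statement) =====
-- stated objective: simpler
-- what changed: Replaces the AFM_WEIGHTS table, list-of-digits materialization and zip-sum by a single Horner accumulation (total = total*2 + digit) over the first eight characters, doubled once at the end.
import Mathlib
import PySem

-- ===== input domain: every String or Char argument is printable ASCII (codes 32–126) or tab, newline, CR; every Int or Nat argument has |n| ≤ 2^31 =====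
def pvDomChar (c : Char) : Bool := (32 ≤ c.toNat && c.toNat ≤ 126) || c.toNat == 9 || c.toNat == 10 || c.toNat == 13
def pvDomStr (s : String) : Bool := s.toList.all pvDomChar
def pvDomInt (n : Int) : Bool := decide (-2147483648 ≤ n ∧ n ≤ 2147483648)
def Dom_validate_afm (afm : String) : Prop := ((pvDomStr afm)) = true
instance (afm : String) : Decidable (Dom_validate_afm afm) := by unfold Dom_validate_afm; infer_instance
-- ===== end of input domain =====

-- B replaces A's weight table and zip-sum by a single Horner doubling pass (simpler, same cost).

-- ===== PORT A =====
def AFM_WEIGHTS : List Int := [256, 128, 64, 32, 16, 8, 4, 2]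

-- int(d) cannot raise after the isdigit guard (ASCII domain), so .getD 0 is never the default
def validate_afm (afm : String) : Bool :=
  if !PySem.Str.strIsdigit afm || PySem.Str.len afm != 9 then false
  else
    let digits : List Int := afm.toList.map (fun d => (PySem.Int.ofChars? [d]).getD 0)
    let total : Int :=
      ((PySem.List.slice digits none (some 8)).zip AFM_WEIGHTS).foldl (fun s p => s + p.1 * p.2) 0
    let remainder := PySem.Int.mod total 11
    let check_digit : Int := if remainder == 10 then 0 else remainder
    PySem.List.pyGet? digits 8 == some check_digit

-- ===== PORT B =====
-- int(ch) cannot raise after the isdigit guard (ASCII domain), so .getD 0 is never the default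
def validate_afm_alt (afm : String) : Bool :=
  if !PySem.Str.strIsdigit afm || PySem.Str.len afm != 9 then false
  else
    let total : Int :=
      ((PySem.Str.slice afm none (some 8)).toList.foldl
        (fun t c => t * 2 + (PySem.Int.ofChars? [c]).getD 0) 0) * 2
    let remainder := PySem.Int.mod total 11
    match PySem.Str.pyGet? afm 8 with
    | some c => (PySem.Int.ofChars? [c]).getD 0 == (if remainder == 10 then 0 else remainder)
    | none => false

-- ===== PRECONDITION & SPEC =====
def Spec_validate_afm (afm : String) (out : Bool) : Prop := out = validate_afm_alt afm
instance (afm : String) (out : Bool) : Decidable (Spec_validate_afm afm out) := by unfold Spec_validate_afm; infer_instance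

-- ===== CLAIM (what is proved, stated in full; the proofs are below) =====
def Claim_equal_validate_afm : Prop := ∀ (afm : String), Dom_validate_afm afm → Spec_validate_afm afm (validate_afm afm)

-- ===== LEMMAS AND PROOFS =====
theorem pv_exists9 {α : Type} (l : List α) (h : l.length = 9) :
    ∃ a b c d e f g h' i, l = [a, b, c, d, e, f, g, h', i] := by
  match l with
  | [a, b, c, d, e, f, g, h', i] => exact ⟨a, b, c, d, e, f, g, h', i, rfl⟩
  | [] | [_] | [_,_] | [_,_,_] | [_,_,_,_] | [_,_,_,_,_] | [_,_,_,_,_,_]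
  | [_,_,_,_,_,_,_] | [_,_,_,_,_,_,_,_] => simp at h
  | _::_::_::_::_::_::_::_::_::_::rest => simp at h

-- ===== VERDICT (by name: the statement is the Claim_ definition above) =====
theorem validate_afm_spec : Claim_equal_validate_afm := by
  intro afm _
  unfold Spec_validate_afm validate_afm validate_afm_alt
  by_cases hg : (!PySem.Str.strIsdigit afm || PySem.Str.len afm != 9) = true
  · simp only [if_pos hg]
  · rw [if_neg hg, if_neg hg]
    have hg' : PySem.Chars.strIsdigit afm.toList = true ∧ (afm.length : Int) = 9 := by
      simpa [PySem.Str.len, PySem.Chars.len] using hg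
    have hlen : afm.toList.length = 9 := by
      have := hg'.2
      rw [← String.length_toList] at this
      exact_mod_cast this
    obtain ⟨a, b, c, d, e, f, g, h, i, hl⟩ := pv_exists9 _ hlen
    simp only [PySem.Str.toList_slice, PySem.Str.pyGet?_eq, hl]
    simp [PySem.List.slice, PySem.List.pyGet?, PySem.List.pyIdx?, PySem.Int.mod, AFM_WEIGHTS]
    ring_nf
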